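-- pv_equiv track=rewrite | github.com/geoisam/FuckScripts | py/huami.py | updateArray
-- ===== SOURCE A (Python) =====
-- def updateArray(group1, group2):
--     mapping = {}
--     for item in group1:
--         if not item:
--             continue
--         user = item[0]
--         mapping[user] = item[1:3]
--     for item in group2:
--         if not item:
--             continue
--         user = item[0]
--         mapping[user] = item[1:3]
--     return [[user] + values for user, values in mapping.items()]
-- ===== SOURCE B (Python) =====
-- def updateArray(group1, group2):
--     # One pass over the concatenation: a reverse sweep picks up each user's
--     # final values (first hit in reverse = last occurrence), then a forward
--     # sweep with a seen-set emits rows in first-occurrence order.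
--     items = [it for it in group1 + group2 if it]
--     vals = {}
--     for it in reversed(items):
--         u = it[0]
--         if u not in vals:
--             vals[u] = it[1:3]
--     out = []
--     seen = set()
--     for it in items:
--         u = it[0]
--         if u not in seen:
--             seen.add(u)
--             out.append([u] + vals[u])
--     return out
-- ===== Notes on version B (the rewrite author's own statement) =====
-- stated objective: alternative
-- what changed: Replaces the overwrite-in-place dict merge with two linear sweeps: a reverse sweep records each user's last values, a forward sweep with a seen-set emits rows in first-occurrence order; no dict of rows is materialized from items().
import Mathlib
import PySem

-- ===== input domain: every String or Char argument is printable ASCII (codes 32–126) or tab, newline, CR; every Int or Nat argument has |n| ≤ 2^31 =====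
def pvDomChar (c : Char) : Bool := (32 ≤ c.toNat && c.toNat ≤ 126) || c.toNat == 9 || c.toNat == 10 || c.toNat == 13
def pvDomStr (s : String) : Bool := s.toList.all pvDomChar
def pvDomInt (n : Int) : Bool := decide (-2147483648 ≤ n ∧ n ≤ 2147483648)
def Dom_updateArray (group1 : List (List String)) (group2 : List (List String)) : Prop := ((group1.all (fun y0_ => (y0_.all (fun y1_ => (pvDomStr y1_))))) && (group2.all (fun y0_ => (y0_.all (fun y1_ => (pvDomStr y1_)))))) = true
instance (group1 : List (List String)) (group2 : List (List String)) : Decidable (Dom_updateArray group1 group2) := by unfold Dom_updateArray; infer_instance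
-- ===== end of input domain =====

-- B replaces the overwrite-in-place dict merge by a reverse sweep (last values per user)
-- plus a forward sweep with a seen-set (first-occurrence order); same cost, different strategy.


-- ===== PORT A =====
-- loop body: 'if not item: continue; user = item[0]; mapping[user] = item[1:3]'
def pvStepA (d : PySem.Dict String (List String)) (item : List String) : PySem.Dict String (List String) :=
  match item with
  | [] => d
  | user :: _ => d.insert user (PySem.List.slice item (some 1) (some 3))

def updateArray (group1 : List (List String)) (group2 : List (List String)) : List (List String) :=
  let mapping := group2.foldl pvStepA (group1.foldl pvStepA PySem.Dict.empty)
  mapping.items.map (fun p => [p.1] ++ p.2)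

-- ===== PORT B =====
-- reverse sweep: 'u = it[0]; if u not in vals: vals[u] = it[1:3]'  (items are all non-empty, so it[0] never raises)
def pvStepVals (d : PySem.Dict String (List String)) (it : List String) : PySem.Dict String (List String) :=
  match it with
  | [] => d
  | u :: _ => if d.contains u then d else d.insert u (PySem.List.slice it (some 1) (some 3))

-- forward sweep: 'u = it[0]; if u not in seen: seen.add(u); out.append([u] + vals[u])'
-- 'vals[u]': the key is always present (every u in items was inserted by the reverse sweep), so getD [] is exact here
def pvStepOut (vals : PySem.Dict String (List String)) (st : PySem.Set String × List (List String)) (it : List String) : PySem.Set String × List (List String) :=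
  match it with
  | [] => st
  | u :: _ => if st.1.contains u then st else (st.1.add u, st.2 ++ [[u] ++ vals.getD u []])

def updateArray_alt (group1 : List (List String)) (group2 : List (List String)) : List (List String) :=
  let items := (group1 ++ group2).filter (fun it => !it.isEmpty)
  let vals := items.reverse.foldl pvStepVals PySem.Dict.empty
  (items.foldl (pvStepOut vals) (PySem.Set.ofList [], [])).2

-- ===== PRECONDITION & SPEC =====
def Spec_updateArray (group1 : List (List String)) (group2 : List (List String)) (out : List (List String)) : Prop := out = updateArray_alt group1 group2
instance (group1 : List (List String)) (group2 : List (List String)) (out : List (List String)) : Decidable (Spec_updateArray group1 group2 out) := by unfold Spec_updateArray; infer_instance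

-- ===== CLAIM (what is proved, stated in full; the proofs are below) =====
def Claim_equal_updateArray : Prop := ∀ (group1 : List (List String)) (group2 : List (List String)), Dom_updateArray group1 group2 → Spec_updateArray group1 group2 (updateArray group1 group2)

-- ===== LEMMAS AND PROOFS =====

-- key / value extracted from a (non-empty) item
def pvKey (it : List String) : String := it.headD ""
def pvVal (it : List String) : List String := PySem.List.slice it (some 1) (some 3)
def pvIns (d : PySem.Dict String (List String)) (it : List String) : PySem.Dict String (List String) :=
  d.insert (pvKey it) (pvVal it)

-- ordered relative dedup: first occurrences of xs that are not already in s
def pvDed : List String → List String → List String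
  | [], _ => []
  | x :: xs, s => if s.contains x then pvDed xs s else x :: pvDed xs (s ++ [x])

-- A's loop skips empty items
theorem foldA_filter (l : List (List String)) (d : PySem.Dict String (List String)) :
    l.foldl pvStepA d = (l.filter (fun it => !it.isEmpty)).foldl pvStepA d := by
  induction l generalizing d with
  | nil => rfl
  | cons it rest ih =>
    cases it with
    | nil => simpa [pvStepA] using ih d
    | cons u t => simp [List.foldl, pvStepA, ih]

-- on non-empty items A's step is a plain keyed insert
theorem foldA_eq_foldIns (l : List (List String)) (d : PySem.Dict String (List String))
    (h : ∀ it ∈ l, it ≠ []) : l.foldl pvStepA d = l.foldl pvIns d := by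
  induction l generalizing d with
  | nil => rfl
  | cons it rest ih =>
    cases it with
    | nil => exact absurd rfl (h [] (List.mem_cons_self))
    | cons u t =>
      simp only [List.foldl]
      rw [ih _ (fun x hx => h x (List.mem_cons_of_mem _ hx))]
      rfl

-- keys of the insert fold: old keys then new keys in first-insertion order
theorem keys_foldIns (l : List (List String)) (d : PySem.Dict String (List String)) :
    (l.foldl pvIns d).keys = d.keys ++ pvDed (l.map pvKey) d.keys := by
  induction l generalizing d with
  | nil => simp [pvDed]
  | cons it rest ih =>
    simp only [List.foldl, List.map, pvDed]
    by_cases hc : d.contains (pvKey it)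
    · have hk : d.keys.contains (pvKey it) = true := by
        simpa [List.contains_iff_mem] using (PySem.Dict.contains_iff_mem_keys d (pvKey it)).1 hc
      rw [ih]
      have hins : pvIns d it = d.insert (pvKey it) (pvVal it) := rfl
      rw [hins, PySem.Dict.keys_insert_of_contains d (pvVal it) hc, hk]
      simp
    · have hmem : pvKey it ∉ d.keys :=
        fun hm => hc ((PySem.Dict.contains_iff_mem_keys d (pvKey it)).2 hm)
      have hk : d.keys.contains (pvKey it) = false := by
        simpa [List.contains_iff_mem] using hmem
      rw [ih]
      have hins : pvIns d it = d.insert (pvKey it) (pvVal it) := rfl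
      rw [hins, PySem.Dict.keys_insert_of_not_contains d (pvVal it) (by simpa using hc), hk]
      simp

-- lookup after the insert fold: last write wins, else the initial dict
theorem get?_foldIns (l : List (List String)) (d : PySem.Dict String (List String)) (u : String) :
    (l.foldl pvIns d).get? u
      = ((l.reverse.find? (fun it => pvKey it == u)).map pvVal).or (d.get? u) := by
  induction l generalizing d with
  | nil => simp
  | cons it rest ih =>
    simp only [List.foldl, List.reverse_cons, List.find?_append, ih]
    by_cases he : pvKey it = u
    · subst he
      cases hf : rest.reverse.find? (fun it' => pvKey it' == pvKey it) with
      | none => simp [pvIns, PySem.Dict.get?_insert_self]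
      | some w => simp [pvIns]
    · have hne : u ≠ pvKey it := fun h => he h.symm
      cases hf : rest.reverse.find? (fun it' => pvKey it' == u) with
      | none => simp [pvIns, PySem.Dict.get?_insert_of_ne d (pvVal it) hne, he]
      | some w => simp [pvIns, he]

-- lookup after B's insert-if-absent fold: the initial dict wins, else the first write
theorem get?_foldVals (l : List (List String)) (d : PySem.Dict String (List String)) (u : String)
    (h : ∀ it ∈ l, it ≠ []) :
    (l.foldl pvStepVals d).get? u
      = (d.get? u).or ((l.find? (fun it => pvKey it == u)).map pvVal) := by
  induction l generalizing d with
  | nil => simp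
  | cons it rest ih =>
    have hrest : ∀ x ∈ rest, x ≠ [] := fun x hx => h x (List.mem_cons_of_mem _ hx)
    cases it with
    | nil => exact absurd rfl (h [] (List.mem_cons_self))
    | cons v t =>
      have hkey : pvKey (v :: t) = v := rfl
      simp only [List.foldl, pvStepVals]
      by_cases hc : d.contains v
      · rw [if_pos hc, ih _ hrest]
        by_cases he : v = u
        · subst he
          have hsome : (d.get? v).isSome := by rw [← PySem.Dict.contains_eq_isSome_get?]; exact hc
          rcases Option.isSome_iff_exists.1 hsome with ⟨w, hw⟩
          simp [hkey, hw]
        · simp [hkey, he]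
      · rw [if_neg hc]
        have hc' : d.contains v = false := by simpa using hc
        have hnone : d.get? v = none := by
          have hh := PySem.Dict.contains_eq_isSome_get? d v
          rw [hc'] at hh
          exact Option.not_isSome_iff_eq_none.1 (by simp [← hh])
        by_cases he : v = u
        · subst he
          rw [ih _ hrest, PySem.Dict.get?_insert_self, hnone]
          simp [hkey, pvVal]
        · have hne : u ≠ v := fun h' => he h'.symm
          rw [ih _ hrest, PySem.Dict.get?_insert_of_ne d _ hne]
          simp [hkey, he]

-- the forward sweep emits first occurrences not yet seen, in order
theorem out_foldOut (vals : PySem.Dict String (List String)) (l : List (List String))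
    (s : PySem.Set String) (acc : List (List String)) (h : ∀ it ∈ l, it ≠ []) :
    (l.foldl (pvStepOut vals) (s, acc)).2
      = acc ++ (pvDed (l.map pvKey) s).map (fun u => [u] ++ vals.getD u []) := by
  induction l generalizing s acc with
  | nil => simp [pvDed]
  | cons it rest ih =>
    have hrest : ∀ x ∈ rest, x ≠ [] := fun x hx => h x (List.mem_cons_of_mem _ hx)
    cases it with
    | nil => exact absurd rfl (h [] (List.mem_cons_self))
    | cons v t =>
      have hkey : pvKey (v :: t) = v := rfl
      simp only [List.foldl, pvStepOut, List.map, hkey, pvDed]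
      by_cases hc : s.contains v
      · rw [if_pos (by simpa using hc), if_pos (by simpa [PySem.Set.contains] using hc)]
        exact ih s acc hrest
      · rw [if_neg (by simpa using hc), if_neg (by simpa [PySem.Set.contains] using hc)]
        have hadd : PySem.Set.add s v = s ++ [v] := by
          simp only [PySem.Set.add]
          rw [if_neg (by simpa [PySem.Set.contains] using hc)]
        rw [hadd, ih (s ++ [v]) (acc ++ [[v] ++ vals.getD v []]) hrest]
        simp

-- items mapped to rows, through the keys (for a dict with distinct keys)
theorem items_map_rows (m : PySem.Dict String (List String)) (h : m.keys.Nodup) :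
    m.items.map (fun p => [p.1] ++ p.2) = m.keys.map (fun k => [k] ++ m.getD k []) := by
  rw [PySem.Dict.items_eq_map_keys m h []]
  simp [List.map_map, Function.comp]

-- ===== VERDICT (by name: the statement is the Claim_ definition above) =====
theorem updateArray_spec : Claim_equal_updateArray := by
  intro g1 g2 _
  unfold Spec_updateArray updateArray updateArray_alt
  set L := (g1 ++ g2).filter (fun it => !it.isEmpty) with hL
  have hne : ∀ it ∈ L, it ≠ [] := by
    intro it hit
    have := List.of_mem_filter hit
    simpa using this
  have hneR : ∀ it ∈ L.reverse, it ≠ [] := fun it hit => hne it (List.mem_reverse.1 hit)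
  -- A's dict equals the plain insert fold over L
  have hA : g2.foldl pvStepA (g1.foldl pvStepA PySem.Dict.empty) = L.foldl pvIns PySem.Dict.empty := by
    rw [← List.foldl_append, foldA_filter, ← hL, foldA_eq_foldIns _ _ hne]
  rw [hA]
  set m := L.foldl pvIns PySem.Dict.empty with hm
  set vals := L.reverse.foldl pvStepVals PySem.Dict.empty with hvals
  have hkeys : m.keys = pvDed (L.map pvKey) [] := by
    rw [hm, keys_foldIns]; simp
  have hnodup : m.keys.Nodup := by
    rw [hm]
    exact PySem.Dict.nodup_keys_foldl_insert_key L pvKey (fun _ it => pvVal it)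
      PySem.Dict.empty (by simp)
  -- the two dicts agree on every lookup
  have hgd : ∀ u, m.getD u [] = vals.getD u [] := by
    intro u
    rw [PySem.Dict.getD_eq_get?_getD, PySem.Dict.getD_eq_get?_getD, hm, hvals,
      get?_foldIns, get?_foldVals _ _ _ hneR]
    simp
  rw [items_map_rows m hnodup, hkeys,
    out_foldOut vals L (PySem.Set.ofList []) [] hne]
  simp only [List.nil_append]
  exact List.map_congr_left (fun u _ => by rw [hgd u])
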